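-- pv_equiv track=rewrite | github.com/IlyaGusev/chai_prize | chai_prize/util/data.py | merge_bot_messages
-- ===== SOURCE A (Python) =====
-- def merge_bot_messages(messages):
--     new_messages = []
--     prev_role = None
--     merge_count = 0
--     for m in messages:
--         role = m["role"]
--         if role != "bot" or prev_role != "bot":
--             new_messages.append(m)
--             merge_count = 0
--         else:
--             assert new_messages[-1]["role"] == "bot"
--             assert role == "bot"
--             new_messages[-1]["content"] += "\n" + m["content"]
--             merge_count += 1
--             if merge_count >= 4:
--                 return None
--         prev_role = role
--     return new_messages
-- ===== SOURCE B (Python) =====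
-- def merge_bot_messages(messages):
--     new_messages = []
--     n = len(messages)
--     i = 0
--     while i < n:
--         role = messages[i]["role"]
--         j = i + 1
--         while j < n and messages[j]["role"] == role:
--             j += 1
--         group = messages[i:j]
--         if role != "bot":
--             new_messages.extend(group)
--         else:
--             if len(group) >= 5:
--                 return None
--             base = group[0]
--             if len(group) > 1:
--                 merged = base["content"]
--                 for g in group[1:]:
--                     merged += "\n" + g["content"]
--                 base["content"] = merged
--             new_messages.append(base)
--         i = j
--     return new_messages
-- ===== Notes on version B (the rewrite author's own statement) =====
-- stated objective: alternative
-- what changed: A is a streaming state machine carrying prev_role and a merge counter across iterations; B instead scans each maximal run of equal roles with a two-pointer inner loop and processes the run as one group (extend it, or abort when a bot run has 5+ messages, or fold its contents into the first message), with no cross-iteration state.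
import Mathlib
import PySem

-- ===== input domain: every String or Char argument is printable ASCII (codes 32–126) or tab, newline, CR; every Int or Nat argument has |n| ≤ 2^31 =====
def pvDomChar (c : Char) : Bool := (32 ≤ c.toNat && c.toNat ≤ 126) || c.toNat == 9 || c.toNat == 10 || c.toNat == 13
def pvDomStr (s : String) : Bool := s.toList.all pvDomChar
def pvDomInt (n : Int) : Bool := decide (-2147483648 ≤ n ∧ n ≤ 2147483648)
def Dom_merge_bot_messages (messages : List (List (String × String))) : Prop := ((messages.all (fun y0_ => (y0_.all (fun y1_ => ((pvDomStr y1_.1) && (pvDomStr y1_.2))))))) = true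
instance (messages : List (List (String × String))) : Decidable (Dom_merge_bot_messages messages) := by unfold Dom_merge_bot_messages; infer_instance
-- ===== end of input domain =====

-- B replaces A's streaming prev_role/merge_count state machine by a two-pointer scan that
-- extracts each maximal run of equal roles and processes it as a group (alternative
-- decomposition, same linear cost). Both A and B mutate the message dicts in place in
-- Python; the equivalence proved here is about the RETURN value only.

-- ===== PORT A =====
-- m.get(k) with default "" — under Pre_ the keys A reads are present, so this is exact
def msgGet (m : List (String × String)) (k : String) : String :=
  (PySem.Dict.mk m).getD k ""

-- new_messages[-1]["content"] += "\n" + m["content"]  (dflt "" never used under Pre_)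
def mergeStep (last m : List (String × String)) : List (String × String) :=
  ((PySem.Dict.mk last).modify "content" "" (fun c => c ++ "\n" ++ msgGet m "content")).items

-- the for-loop of A; acc holds new_messages reversed, prev = prev_role, cnt = merge_count
def mbmLoopA : List (List (String × String)) → List (List (String × String)) →
    Option String → Int → Option (List (List (String × String)))
  | [], acc, _, _ => some acc.reverse
  | m :: ms, acc, prev, cnt =>
    let role := msgGet m "role"
    if role ≠ "bot" ∨ prev ≠ some "bot" then
      mbmLoopA ms (m :: acc) (some role) 0
    else
      match acc with
      | [] => none   -- unreachable: prev = some "bot" only after an append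
      | last :: accRest =>
        let last' := mergeStep last m
        if 4 ≤ cnt + 1 then none
        else mbmLoopA ms (last' :: accRest) (some role) (cnt + 1)

def merge_bot_messages (messages : List (List (String × String))) :
    Option (List (List (String × String))) :=
  mbmLoopA messages [] none 0

-- ===== PORT B =====
-- the inner while loop of B: split off the maximal run of messages with role r
def spanRole (r : String) : List (List (String × String)) →
    (List (List (String × String)) × List (List (String × String)))
  | [] => ([], [])
  | m :: ms =>
    if msgGet m "role" = r then
      let p := spanRole r ms
      (m :: p.1, p.2)
    else ([], m :: ms)

theorem spanRole_rest_length (r : String) :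
    ∀ ms : List (List (String × String)), (spanRole r ms).2.length ≤ ms.length := by
  intro ms
  induction ms with
  | nil => simp [spanRole]
  | cons m ms ih =>
    simp only [spanRole]
    split
    · exact Nat.le_succ_of_le ih
    · simp

-- the outer while loop of B; acc holds new_messages reversed
def mbmLoopB : List (List (String × String)) → List (List (String × String)) →
    Option (List (List (String × String)))
  | [], acc => some acc.reverse
  | m :: ms, acc =>
    let r := msgGet m "role"
    let run := (spanRole r ms).1
    let rest := (spanRole r ms).2
    if r ≠ "bot" then
      mbmLoopB rest ((m :: run).reverse ++ acc)
    else if 5 ≤ (m :: run).length then none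
    else
      let base :=
        if 1 < (m :: run).length then
          ((PySem.Dict.mk m).insert "content"
            (run.foldl (fun s g => s ++ "\n" ++ msgGet g "content") (msgGet m "content"))).items
        else m
      mbmLoopB rest (base :: acc)
termination_by msgs _ => msgs.length
decreasing_by all_goals
  exact Nat.lt_succ_of_le (spanRole_rest_length _ _)

def merge_bot_messages_alt (messages : List (List (String × String))) :
    Option (List (List (String × String))) :=
  mbmLoopB messages []

-- ===== PRECONDITION & SPEC =====
-- Pre_ excludes exactly the inputs where Python A raises KeyError (a message without a
-- "role" key, or two adjacent "bot" messages one of which lacks "content") — including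
-- tails A never inspects because it aborted at the 5th consecutive bot first (there A
-- returns None; see cites) — and assoc lists with duplicate keys, which do not represent
-- a Python dict.
def Pre_merge_bot_messages (messages : List (List (String × String))) : Prop :=
  (∀ m ∈ messages, "role" ∈ m.map Prod.fst) ∧
  (∀ m ∈ messages, (m.map Prod.fst).Nodup) ∧
  (∀ p ∈ messages.zip messages.tail,
      msgGet p.1 "role" = "bot" → msgGet p.2 "role" = "bot" →
      "content" ∈ p.1.map Prod.fst ∧ "content" ∈ p.2.map Prod.fst)
instance (messages : List (List (String × String))) : Decidable (Pre_merge_bot_messages messages) := by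
  unfold Pre_merge_bot_messages; infer_instance

def pvWitness_merge_bot_messages : (List (List (String × String))) :=
  [[("role", "user"), ("content", "hi")],
   [("role", "bot"), ("content", "a")],
   [("role", "bot"), ("content", "b")]]

def Spec_merge_bot_messages (messages : List (List (String × String))) (out : Option (List (List (String × String)))) : Prop := out = merge_bot_messages_alt messages
instance (messages : List (List (String × String))) (out : Option (List (List (String × String)))) : Decidable (Spec_merge_bot_messages messages out) := by unfold Spec_merge_bot_messages; infer_instance

-- ===== CLAIM (what is proved, stated in full; the proofs are below) =====
def Claim_equal_merge_bot_messages : Prop := ∀ (messages : List (List (String × String))), Dom_merge_bot_messages messages → Pre_merge_bot_messages messages → Spec_merge_bot_messages messages (merge_bot_messages messages)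

-- ===== LEMMAS AND PROOFS =====

theorem witness_ok :
    Dom_merge_bot_messages pvWitness_merge_bot_messages ∧
    Pre_merge_bot_messages pvWitness_merge_bot_messages := by
  constructor <;> decide

theorem modify_eq_insert (d : PySem.Dict String String) (k dflt : String) (f : String → String) :
    d.modify k dflt f = d.insert k (f (d.getD k dflt)) :=
  PySem.Dict.ext_iff.mpr rfl

theorem mbmLoopB_cons (m : List (String × String)) (ms acc : List (List (String × String))) :
    mbmLoopB (m :: ms) acc =
      if msgGet m "role" ≠ "bot" then
        mbmLoopB (spanRole (msgGet m "role") ms).2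
          ((m :: (spanRole (msgGet m "role") ms).1).reverse ++ acc)
      else if 5 ≤ (m :: (spanRole (msgGet m "role") ms).1).length then none
      else
        mbmLoopB (spanRole (msgGet m "role") ms).2
          ((if 1 < (m :: (spanRole (msgGet m "role") ms).1).length then
              ((PySem.Dict.mk m).insert "content"
                ((spanRole (msgGet m "role") ms).1.foldl
                  (fun s g => s ++ "\n" ++ msgGet g "content") (msgGet m "content"))).items
            else m) :: acc) := by
  rw [mbmLoopB]

theorem spanRole_append (r : String) :
    ∀ ms : List (List (String × String)), (spanRole r ms).1 ++ (spanRole r ms).2 = ms := by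
  intro ms
  induction ms with
  | nil => simp [spanRole]
  | cons m ms ih =>
    simp only [spanRole]
    split
    · simpa using ih
    · simp

theorem spanRole_run_role (r : String) :
    ∀ ms : List (List (String × String)), ∀ g ∈ (spanRole r ms).1, msgGet g "role" = r := by
  intro ms
  induction ms with
  | nil => simp [spanRole]
  | cons m ms ih =>
    simp only [spanRole]
    split
    · intro g hg
      rcases List.mem_cons.mp hg with h | h
      · subst h; assumption
      · exact ih g h
    · simp

theorem spanRole_rest_head (r : String) :
    ∀ ms h t, (spanRole r ms).2 = h :: t → msgGet h "role" ≠ r := by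
  intro ms
  induction ms with
  | nil => simp [spanRole]
  | cons m ms ih =>
    simp only [spanRole]
    split
    · exact ih
    · rename_i hne
      intro h t heq
      obtain ⟨rfl, -⟩ : m = h ∧ ms = t := by
        constructor <;> simp_all
      exact hne

-- the merge_count argument is irrelevant when prev_role is not "bot"
theorem loopA_cnt_irrel (msgs acc : List (List (String × String))) (r : String)
    (hr : r ≠ "bot") (cnt cnt' : Int) :
    mbmLoopA msgs acc (some r) cnt = mbmLoopA msgs acc (some r) cnt' := by
  cases msgs with
  | nil => rfl
  | cons m ms =>
    simp only [mbmLoopA]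
    rw [if_pos (Or.inr (by simpa using hr)), if_pos (Or.inr (by simpa using hr))]

-- A appends a whole non-bot run unchanged
theorem loopA_nonbot (r : String) (hr : r ≠ "bot") :
    ∀ (grp rest acc : List (List (String × String))) (cnt : Int),
    (∀ g ∈ grp, msgGet g "role" = r) →
    mbmLoopA (grp ++ rest) acc (some r) cnt = mbmLoopA rest (grp.reverse ++ acc) (some r) 0 := by
  intro grp
  induction grp with
  | nil =>
    intro rest acc cnt _
    simpa using loopA_cnt_irrel rest acc r hr cnt 0
  | cons g grp ih =>
    intro rest acc cnt hroles
    have hg : msgGet g "role" = r := hroles g (List.mem_cons_self ..)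
    simp only [List.cons_append, mbmLoopA]
    rw [if_pos (Or.inl (by simp [hg, hr]))]
    rw [hg, ih rest (g :: acc) 0 (fun x hx => hroles x (List.mem_cons_of_mem _ hx))]
    simp [List.append_assoc]

-- A folds a whole bot run into the last appended message, aborting iff the run
-- pushes merge_count to 4
theorem loopA_bot :
    ∀ (grp : List (List (String × String))) (rest acc : List (List (String × String)))
      (base : List (String × String)) (cnt : Int),
    (∀ g ∈ grp, msgGet g "role" = "bot") → cnt < 4 →
    mbmLoopA (grp ++ rest) (base :: acc) (some "bot") cnt =
      if 4 ≤ cnt + grp.length then none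
      else mbmLoopA rest (grp.foldl mergeStep base :: acc) (some "bot") (cnt + grp.length) := by
  intro grp
  induction grp with
  | nil =>
    intro rest acc base cnt _ hcnt
    rw [if_neg (by simp only [List.length_nil, Nat.cast_zero, add_zero]; omega)]
    simp
  | cons g grp ih =>
    intro rest acc base cnt hroles hcnt
    have hg : msgGet g "role" = "bot" := hroles g (List.mem_cons_self ..)
    simp only [List.cons_append, mbmLoopA]
    rw [if_neg (by simp [hg])]
    by_cases habort : (4 : Int) ≤ cnt + 1
    · rw [if_pos habort, if_pos (by simp only [List.length_cons]; push_cast; omega)]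
    · rw [if_neg habort]
      rw [hg, ih rest acc (mergeStep base g) (cnt + 1)
            (fun x hx => hroles x (List.mem_cons_of_mem _ hx)) (by omega)]
      have hcnt2 : cnt + 1 + (grp.length : Int) = cnt + ((g :: grp).length : Int) := by
        simp only [List.length_cons]; push_cast; ring
      rw [hcnt2]
      split_ifs with h1
      · rfl
      · simp [List.foldl_cons]

-- folding mergeSteps over a run is a single insert of the folded content string
theorem foldl_mergeStep_insert :
    ∀ (gs : List (List (String × String))) (d : PySem.Dict String String) (s : String),
    gs.foldl mergeStep (d.insert "content" s).items =
      (d.insert "content"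
        (gs.foldl (fun s g => s ++ "\n" ++ msgGet g "content") s)).items := by
  intro gs
  induction gs with
  | nil => intro d s; rfl
  | cons g gs ih =>
    intro d s
    simp only [List.foldl_cons]
    have hstep : mergeStep (d.insert "content" s).items g =
        (d.insert "content" (s ++ "\n" ++ msgGet g "content")).items := by
      show ((PySem.Dict.mk (d.insert "content" s).items).modify "content" ""
              (fun c => c ++ "\n" ++ msgGet g "content")).items = _
      rw [show PySem.Dict.mk (d.insert "content" s).items = d.insert "content" s from rfl]
      rw [modify_eq_insert, PySem.Dict.getD_insert_self, PySem.Dict.insert_insert_self]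
    rw [hstep, ih]

theorem foldl_mergeStep (g : List (String × String)) (gs : List (List (String × String)))
    (m : List (String × String)) :
    (g :: gs).foldl mergeStep m =
      ((PySem.Dict.mk m).insert "content"
        ((g :: gs).foldl (fun s x => s ++ "\n" ++ msgGet x "content") (msgGet m "content"))).items := by
  have hfirst : mergeStep m g =
      ((PySem.Dict.mk m).insert "content" (msgGet m "content" ++ "\n" ++ msgGet g "content")).items := by
    show ((PySem.Dict.mk m).modify "content" "" (fun c => c ++ "\n" ++ msgGet g "content")).items = _
    rw [modify_eq_insert]; rfl
  simp only [List.foldl_cons, hfirst]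
  exact foldl_mergeStep_insert gs (PySem.Dict.mk m) _

-- main lemma: from any fresh run boundary the two loops agree
theorem loopAB : ∀ (n : Nat) (msgs acc : List (List (String × String)))
    (prev : Option String) (cnt : Int), msgs.length ≤ n → cnt < 4 →
    (∀ h, msgs.head? = some h → msgGet h "role" = "bot" → prev ≠ some "bot") →
    mbmLoopA msgs acc prev cnt = mbmLoopB msgs acc := by
  intro n
  induction n with
  | zero =>
    intro msgs acc prev cnt hlen _ _
    have : msgs = [] := List.length_eq_zero_iff.mp (Nat.le_zero.mp hlen)
    subst this
    rw [mbmLoopB]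
    rfl
  | succ n ih =>
    intro msgs acc prev cnt hlen hcnt hfresh
    cases msgs with
    | nil => rw [mbmLoopB]; rfl
    | cons m ms =>
      have hsplit := spanRole_append (msgGet m "role") ms
      have hroles := spanRole_run_role (msgGet m "role") ms
      have hrest_len : (spanRole (msgGet m "role") ms).2.length ≤ n := by
        have := spanRole_rest_length (msgGet m "role") ms
        simp only [List.length_cons] at hlen
        omega
      have hrest_fresh : ∀ h, (spanRole (msgGet m "role") ms).2.head? = some h →
          msgGet h "role" ≠ msgGet m "role" := by
        intro h hh
        cases hrest : (spanRole (msgGet m "role") ms).2 with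
        | nil => rw [hrest] at hh; cases hh
        | cons x t =>
          rw [hrest] at hh
          cases hh
          exact spanRole_rest_head (msgGet m "role") ms _ t hrest
      -- A takes the append branch on m
      have hstep : mbmLoopA (m :: ms) acc prev cnt =
          mbmLoopA ms (m :: acc) (some (msgGet m "role")) 0 := by
        simp only [mbmLoopA]
        rw [if_pos]
        by_cases hbm : msgGet m "role" = "bot"
        · exact Or.inr (hfresh m rfl hbm)
        · exact Or.inl (by simpa using hbm)
      rw [hstep, mbmLoopB_cons]
      by_cases hb : msgGet m "role" = "bot"
      · -- bot run: A merges the run into m; B merges the group in one go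
        rw [hb] at hsplit hroles hrest_len hrest_fresh ⊢
        rw [if_neg (by simp)]
        conv_lhs => rw [← hsplit]
        rw [loopA_bot (spanRole "bot" ms).1 (spanRole "bot" ms).2 acc m 0 hroles (by norm_num)]
        have hlen_iff : (5 ≤ (m :: (spanRole "bot" ms).1).length) ↔
            ((4 : Int) ≤ 0 + ((spanRole "bot" ms).1.length : Int)) := by
          simp only [List.length_cons]
          constructor <;> intro h <;> [push_cast; push_cast at h] <;> omega
        by_cases habort : (4 : Int) ≤ 0 + ((spanRole "bot" ms).1.length : Int)
        · rw [if_pos habort, if_pos (hlen_iff.mpr habort)]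
        · rw [if_neg habort, if_neg (fun h => habort (hlen_iff.mp h))]
          have hcnt' : (0 : Int) + ((spanRole "bot" ms).1.length : Int) < 4 := by
            by_contra h; exact habort (by omega)
          cases hrun : (spanRole "bot" ms).1 with
          | nil =>
            simp only [List.foldl_nil]
            rw [if_neg (by simp)]
            exact ih (spanRole "bot" ms).2 (m :: acc) (some "bot") _ hrest_len
              (by rw [hrun] at hcnt'; simpa using hcnt')
              (fun h hh hhb => absurd hhb (hrest_fresh h hh))
          | cons g gs =>
            rw [foldl_mergeStep g gs m]
            rw [if_pos (by simp)]
            exact ih (spanRole "bot" ms).2 _ (some "bot") _ hrest_len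
              (by rw [hrun] at hcnt'; exact hcnt')
              (fun h hh hhb => absurd hhb (hrest_fresh h hh))
      · -- non-bot run: both append the whole run unchanged
        rw [if_pos (by simpa using hb)]
        conv_lhs => rw [← hsplit]
        rw [loopA_nonbot (msgGet m "role") hb (spanRole (msgGet m "role") ms).1
              (spanRole (msgGet m "role") ms).2 (m :: acc) 0 hroles]
        have hacc : (m :: (spanRole (msgGet m "role") ms).1).reverse ++ acc =
            (spanRole (msgGet m "role") ms).1.reverse ++ (m :: acc) := by
          simp
        rw [hacc]
        exact ih (spanRole (msgGet m "role") ms).2 _ (some (msgGet m "role")) 0 hrest_len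
          (by norm_num)
          (fun h hh _ => by
            intro hcontra
            exact hb (by injection hcontra))

-- ===== VERDICT (by name: the statement is the Claim_ definition above) =====
theorem merge_bot_messages_spec : Claim_equal_merge_bot_messages := by
  intro messages _ _
  unfold Spec_merge_bot_messages merge_bot_messages merge_bot_messages_alt
  exact loopAB messages.length messages [] none 0 le_rfl (by norm_num)
    (fun h _ _ => by intro hc; cases hc)
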